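-- pv_equiv track=rewrite | github.com/philass/justPrintIt | justPrintIt.py | ends_in_semicolon
-- ===== SOURCE A (Python) =====
-- def ends_in_semicolon(line):
--     """
--     Returns True if last non-white space character
--     is a semicolon
--     """
--     ends_in_semi = False
--     for c in line:
--         if c == ';':
--            ends_in_semi = True
--         elif c not in ["\t", " ", '\n']:
--             ends_in_semi = False
--     return ends_in_semi
-- ===== SOURCE B (Python) =====
-- def ends_in_semicolon(line):
--     """
--     Returns True if last non-white space character
--     is a semicolon
--     """
--     for c in reversed(line):
--         if c in ("\t", " ", "\n"):
--             continue
--         return c == ';'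
--     return False
-- ===== Notes on version B (the rewrite author's own statement) =====
-- stated objective: simpler
-- what changed: Replaces the forward scan with a mutable flag by a reverse scan that skips trailing whitespace and returns at the first non-whitespace character (early exit, so it usually inspects only the tail of the line).
import Mathlib
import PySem

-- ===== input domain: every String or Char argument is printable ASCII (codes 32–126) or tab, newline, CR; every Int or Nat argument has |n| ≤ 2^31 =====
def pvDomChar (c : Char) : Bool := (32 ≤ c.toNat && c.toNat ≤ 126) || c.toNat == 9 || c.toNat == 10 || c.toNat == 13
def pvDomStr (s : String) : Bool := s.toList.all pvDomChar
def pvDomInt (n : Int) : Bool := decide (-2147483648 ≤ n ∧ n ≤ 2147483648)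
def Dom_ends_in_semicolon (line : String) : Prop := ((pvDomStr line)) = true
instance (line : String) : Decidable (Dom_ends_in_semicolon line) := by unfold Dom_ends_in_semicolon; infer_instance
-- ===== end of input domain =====

-- B scans the line in reverse and early-exits at the first non-whitespace character; simpler than A's forward scan with a mutable flag.


-- ===== PORT A =====
def ends_in_semicolon (line : String) : Bool :=
  line.toList.foldl
    (fun ends_in_semi c =>
      if c = ';' then true
      else if ¬ (c ∈ ['\t', ' ', '\n']) then false
      else ends_in_semi)
    false

-- ===== PORT B =====
def ends_in_semicolon_alt_go : List Char → Bool
  | [] => false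
  | c :: rest =>
    if c ∈ ['\t', ' ', '\n'] then ends_in_semicolon_alt_go rest
    else c = ';'

def ends_in_semicolon_alt (line : String) : Bool :=
  ends_in_semicolon_alt_go line.toList.reverse

-- ===== PRECONDITION & SPEC =====
def Spec_ends_in_semicolon (line : String) (out : Bool) : Prop := out = ends_in_semicolon_alt line
instance (line : String) (out : Bool) : Decidable (Spec_ends_in_semicolon line out) := by unfold Spec_ends_in_semicolon; infer_instance

-- ===== CLAIM (what is proved, stated in full; the proofs are below) =====
def Claim_equal_ends_in_semicolon : Prop := ∀ (line : String), Dom_ends_in_semicolon line → Spec_ends_in_semicolon line (ends_in_semicolon line)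

-- ===== LEMMAS AND PROOFS =====

-- A's step function
def pvStepA (acc : Bool) (c : Char) : Bool :=
  if c = ';' then true
  else if ¬ (c ∈ ['\t', ' ', '\n']) then false
  else acc

-- B's scan with an explicit default for the all-whitespace case
def pvGo : List Char → Bool → Bool
  | [], acc => acc
  | c :: rest, acc =>
    if c ∈ ['\t', ' ', '\n'] then pvGo rest acc
    else c = ';'

theorem pvGo_false (xs : List Char) : pvGo xs false = ends_in_semicolon_alt_go xs := by
  induction xs with
  | nil => rfl
  | cons c rest ih => simp [pvGo, ends_in_semicolon_alt_go, ih]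

theorem pvGo_snoc (xs : List Char) (c : Char) (acc : Bool) :
    pvGo (xs ++ [c]) acc = pvGo xs (pvStepA acc c) := by
  induction xs with
  | nil =>
    by_cases hws : c ∈ ['\t', ' ', '\n']
    · have hne : c ≠ ';' := by
        simp only [List.mem_cons, List.not_mem_nil, or_false] at hws
        rcases hws with h | h | h <;> simp [h]
      simp [pvGo, pvStepA, hws, hne]
    · by_cases h : c = ';' <;> simp [pvGo, pvStepA, hws, h]
  | cons x rest ih => simp [pvGo, ih]

theorem pvFoldl_go (xs : List Char) (acc : Bool) :
    xs.foldl pvStepA acc = pvGo xs.reverse acc := by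
  induction xs generalizing acc with
  | nil => rfl
  | cons c rest ih => simp [List.foldl, ih, pvGo_snoc]

-- ===== VERDICT (by name: the statement is the Claim_ definition above) =====
theorem ends_in_semicolon_spec : Claim_equal_ends_in_semicolon := by
  intro line _
  unfold Spec_ends_in_semicolon ends_in_semicolon ends_in_semicolon_alt
  rw [show (fun ends_in_semi c =>
      if c = ';' then true
      else if ¬ (c ∈ ['\t', ' ', '\n']) then false
      else ends_in_semi) = pvStepA from rfl]
  rw [pvFoldl_go, pvGo_false]
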